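-- pv_equiv track=rewrite | github.com/dbzahariev/Python-Fundamentals | ex_01_list_and_dictionaries/01_kolega.py | sum_adj_nums
-- ===== SOURCE A (Python) =====
-- def sum_adj_nums(numbers):
--     adj_exist = True
--     while adj_exist:
--         temp_list = []
--         for i in range(0, len(numbers) - 1):
--             first_num = numbers[i]
--             second_num = numbers[i + 1]
--             if first_num == second_num:
--                 third = first_num + second_num
--                 numbers[i] = third
--                 numbers.pop(i + 1)
--                 break
--             if i == len(numbers) - 2:
--                 return numbers
--         for num in numbers:
--             temp_list.append(num)
--         numbers.clear()
--         for num in temp_list: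
--             numbers.append(num)
--
--         if len(numbers) == 1:
--             return numbers
-- ===== SOURCE B (Python) =====
-- def sum_adj_nums(numbers):
--     # Single stack pass: combine each value with the stack top while equal (cascading).
--     stack = []
--     for x in numbers:
--         while stack and stack[-1] == x:
--             x += stack.pop()
--         stack.append(x)
--     numbers[:] = stack
--     return numbers
-- ===== Notes on version B (the rewrite author's own statement) =====
-- stated objective: faster
-- what changed: Replaced A's restart-from-scratch loop (find the leftmost adjacent equal pair, merge it, rescan the whole list) by a single left-to-right stack pass that combines each incoming value with the stack top while they are equal (cascading merges), which produces the same final list in one pass.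
import Mathlib
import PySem

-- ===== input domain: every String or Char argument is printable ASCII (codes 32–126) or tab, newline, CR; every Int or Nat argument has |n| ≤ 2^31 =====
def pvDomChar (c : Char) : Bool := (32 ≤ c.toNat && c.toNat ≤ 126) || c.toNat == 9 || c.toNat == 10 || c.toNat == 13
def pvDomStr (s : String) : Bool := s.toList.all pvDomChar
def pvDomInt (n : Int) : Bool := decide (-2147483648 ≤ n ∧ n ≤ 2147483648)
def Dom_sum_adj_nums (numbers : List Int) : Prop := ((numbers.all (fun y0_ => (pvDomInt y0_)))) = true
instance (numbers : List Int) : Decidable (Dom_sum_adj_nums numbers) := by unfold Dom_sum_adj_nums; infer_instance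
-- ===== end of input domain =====

-- B replaces A's merge-and-rescan loop by one left-to-right stack pass (cascading merges with
-- the stack top); A mutates `numbers` in place and B performs the same final in-place update —
-- the theorems below are about the returned value.

-- ===== PORT A =====
-- inner `for i in range(0, len(numbers)-1)` loop of A:
--   .inl r = the loop executed `return numbers` (the `i == len(numbers) - 2` branch),
--   .inr r = the loop broke after a merge, or ran to the end without either (r = list afterwards).
-- fuel = number of remaining indices of the range (`ns.length - i`): the `for` loop is bounded.
def sumAdjInnerGo : Nat → List Int → Nat → Sum (List Int) (List Int)
  | 0, ns, _ => .inr ns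
  | fuel + 1, ns, i =>
    if i < ns.length - 1 then
      let first := ns.getD i 0
      let second := ns.getD (i + 1) 0
      if first = second then
        .inr ((ns.set i (first + second)).eraseIdx (i + 1))   -- numbers[i] = third; numbers.pop(i+1); break
      else if i = ns.length - 2 then .inl ns                   -- return numbers
      else sumAdjInnerGo fuel ns (i + 1)
    else .inr ns

def sumAdjInner (ns : List Int) (i : Nat) : Sum (List Int) (List Int) :=
  sumAdjInnerGo (ns.length - i) ns i

-- outer `while adj_exist:` loop of A; every pass that does not return shortens the list by one,
-- so `numbers.length` is enough fuel on every input where the Python loop terminates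
-- (every nonempty list; on [] the Python loop runs forever — excluded by Pre_).
def sumAdjWhile : Nat → List Int → List Int
  | 0, ns => ns
  | fuel + 1, ns =>
      match sumAdjInner ns 0 with
      | .inl r => r
      | .inr r => if r.length = 1 then r else sumAdjWhile fuel r

def sum_adj_nums (numbers : List Int) : List Int :=
  sumAdjWhile numbers.length numbers

-- ===== PORT B =====
-- `while stack and stack[-1] == x: x += stack.pop()` then `stack.append(x)`;
-- the stack is stored top-first, so the final answer is its reverse.
def pushCascade (stack : List Int) (x : Int) : List Int :=
  match stack with
  | [] => [x]
  | t :: rest => if t = x then pushCascade rest (x + t) else x :: t :: rest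

def sum_adj_nums_alt (numbers : List Int) : List Int :=
  (numbers.foldl pushCascade []).reverse

-- ===== PRECONDITION & SPEC =====
-- Pre_ excludes only the empty list: there A's `while True` loop never returns (it diverges).
def Pre_sum_adj_nums (numbers : List Int) : Prop := numbers ≠ []
instance (numbers : List Int) : Decidable (Pre_sum_adj_nums numbers) := by
  unfold Pre_sum_adj_nums; infer_instance

def pvWitness_sum_adj_nums : List Int := [5, 5, 2, 3]

def Spec_sum_adj_nums (numbers : List Int) (out : List Int) : Prop := out = sum_adj_nums_alt numbers
instance (numbers : List Int) (out : List Int) : Decidable (Spec_sum_adj_nums numbers out) := by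
  unfold Spec_sum_adj_nums; infer_instance

-- ===== CLAIM (what is proved, stated in full; the proofs are below) =====
def Claim_equal_sum_adj_nums : Prop := ∀ (numbers : List Int), Dom_sum_adj_nums numbers → Pre_sum_adj_nums numbers → Spec_sum_adj_nums numbers (sum_adj_nums numbers)

-- ===== LEMMAS AND PROOFS =====

-- A list without adjacent equal elements is a fixpoint of B's stack pass.
theorem foldl_pushCascade_chain (p : List Int) (s : List Int)
    (hc : List.IsChain (· ≠ ·) p)
    (hhd : ∀ t ∈ s.head?, ∀ x ∈ p.head?, t ≠ x) :
    p.foldl pushCascade s = p.reverse ++ s := by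
  induction p generalizing s with
  | nil => simp
  | cons x rest ih =>
      have hstep : pushCascade s x = x :: s := by
        cases s with
        | nil => simp [pushCascade]
        | cons t srest =>
            have : t ≠ x := hhd t rfl x rfl
            simp [pushCascade, this]
      simp only [List.foldl_cons, hstep]
      rw [ih (x :: s) hc.of_cons ?_]
      · simp
      · intro t ht y hy
        cases ht
        cases rest with
        | nil => cases hy
        | cons z zs => cases hy; exact hc.rel

-- Merging the leftmost adjacent equal pair does not change B's result.
theorem foldl_pushCascade_merge (p q : List Int) (a : Int)
    (hc : List.IsChain (· ≠ ·) (p ++ [a])) :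
    (p ++ a :: a :: q).foldl pushCascade [] = (p ++ (a + a) :: q).foldl pushCascade [] := by
  have hcp : List.IsChain (· ≠ ·) p := hc.left_of_append
  have hp : p.foldl pushCascade [] = p.reverse := by
    simpa using foldl_pushCascade_chain p [] hcp (by intro t ht; cases ht)
  have hpa : pushCascade p.reverse a = a :: p.reverse := by
    cases hrev : p.reverse with
    | nil => simp [pushCascade]
    | cons t srest =>
        have hlast : p.getLast? = some t := by
          rw [← List.head?_reverse, hrev]; rfl
        have hta : t ≠ a := by
          have := (List.isChain_append.mp hc).2.2
          exact this t hlast a rfl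
        simp [pushCascade, hta]
  have hcasc : pushCascade (a :: p.reverse) a = pushCascade p.reverse (a + a) := by
    simp [pushCascade]
  simp only [List.foldl_append, List.foldl_cons, hp, hpa, hcasc]

-- B's result on a one-element list is that list.
theorem alt_singleton (x : Int) : sum_adj_nums_alt [x] = [x] := by
  simp [sum_adj_nums_alt, pushCascade]

-- B's result on a list without adjacent equal elements is that list.
theorem alt_chain (ns : List Int) (hc : List.IsChain (· ≠ ·) ns) : sum_adj_nums_alt ns = ns := by
  unfold sum_adj_nums_alt
  rw [foldl_pushCascade_chain ns [] hc (by intro t ht; cases ht)]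
  simp

-- index-level merge written as a list splice
theorem set_erase_splice (p : List Int) (a b c : Int) (q : List Int) :
    ((p ++ a :: b :: q).set p.length c).eraseIdx (p.length + 1) = p ++ c :: q := by
  induction p with
  | nil => simp
  | cons x xs ih => simpa using ih

-- what A's inner loop produces, given that no adjacent equal pair occurs before index i
theorem sumAdjInnerGo_spec (fuel : Nat) : ∀ (ns : List Int) (i : Nat),
    i + 2 ≤ ns.length → ns.length ≤ i + 1 + fuel →
    (∀ j, j < i → ns.getD j 0 ≠ ns.getD (j + 1) 0) →
    (sumAdjInnerGo fuel ns i = .inl ns ∧ List.IsChain (· ≠ ·) ns) ∨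
    (∃ r, sumAdjInnerGo fuel ns i = .inr r ∧ sum_adj_nums_alt r = sum_adj_nums_alt ns ∧
      r.length + 1 = ns.length) := by
  induction fuel with
  | zero => intro ns i hi hfuel hinv; omega
  | succ fuel ih =>
  intro ns i hi hfuel hinv
  have hilt : i < ns.length - 1 := by omega
  have hi1 : i + 1 < ns.length := by omega
  have hi0 : i < ns.length := by omega
  rw [sumAdjInnerGo]
  rw [if_pos hilt]
  have hg1 : ns.getD i 0 = ns[i] := List.getD_eq_getElem ns 0 hi0
  have hg2 : ns.getD (i + 1) 0 = ns[i + 1] := List.getD_eq_getElem ns 0 hi1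
  by_cases heq : ns.getD i 0 = ns.getD (i + 1) 0
  · right
    rw [if_pos heq]
    set p := ns.take i with hp
    set q := ns.drop (i + 2) with hq
    set a := ns[i] with ha
    set b := ns[i + 1] with hb
    have hplen : p.length = i := by simp [hp]; omega
    have hsplit : ns = p ++ a :: b :: q := by
      conv_lhs => rw [← List.take_append_drop i ns]
      rw [List.drop_eq_getElem_cons hi0, List.drop_eq_getElem_cons hi1]
    have haa : b = a := by rw [← hg2, ← hg1]; exact heq.symm
    have hchain : List.IsChain (· ≠ ·) (p ++ [a]) := by
      have htake : p ++ [a] = ns.take (i + 1) := by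
        rw [List.take_add_one]
        congr 1
        rw [ha]
        simp [List.getElem?_eq_getElem hi0]
      rw [htake]
      rw [List.isChain_iff_getElem]
      intro j hj
      have hjlen : j + 1 < i + 1 := by
        have := hj; simp at this; omega
      have hji : j < i := by omega
      have h1 : j < ns.length := by omega
      have h2 : j + 1 < ns.length := by omega
      have := hinv j hji
      rw [List.getD_eq_getElem ns 0 h1, List.getD_eq_getElem ns 0 h2] at this
      simpa [List.getElem_take] using this
    refine ⟨_, rfl, ?_, ?_⟩
    · have hmerge : (ns.set i (ns.getD i 0 + ns.getD (i + 1) 0)).eraseIdx (i + 1)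
          = p ++ (a + a) :: q := by
        rw [hg1, hg2, haa]
        conv_lhs => rw [hsplit]
        rw [← hplen]
        exact set_erase_splice p a b (a + a) q
      rw [hmerge]
      unfold sum_adj_nums_alt
      rw [← foldl_pushCascade_merge p q a hchain]
      conv_rhs => rw [hsplit, haa]
    · have : ((ns.set i (ns.getD i 0 + ns.getD (i + 1) 0)).eraseIdx (i + 1)).length
          = ns.length - 1 := by
        rw [List.length_eraseIdx_of_lt (by simpa using hi1)]
        simp
      omega
  · rw [if_neg heq]
    by_cases hlast : i = ns.length - 2
    · left
      rw [if_pos hlast]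
      refine ⟨rfl, ?_⟩
      rw [List.isChain_iff_getElem]
      intro j hj
      have hj1 : j + 1 < ns.length := hj
      have hj0 : j < ns.length := by omega
      rcases Nat.lt_or_ge j i with hji | hji
      · have := hinv j hji
        rwa [List.getD_eq_getElem ns 0 hj0, List.getD_eq_getElem ns 0 hj1] at this
      · have : j = i := by omega
        subst this
        rwa [hg1, hg2] at heq
    · rw [if_neg hlast]
      have hi' : i + 1 + 2 ≤ ns.length := by omega
      have hinv' : ∀ j, j < i + 1 → ns.getD j 0 ≠ ns.getD (j + 1) 0 := by
        intro j hj
        rcases Nat.lt_or_ge j i with hji | hji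
        · exact hinv j hji
        · have : j = i := by omega
          subst this; exact heq
      exact ih ns (i + 1) hi' (by omega) hinv'

theorem sumAdjInner_spec (ns : List Int) (i : Nat)
    (hi : i + 2 ≤ ns.length)
    (hinv : ∀ j, j < i → ns.getD j 0 ≠ ns.getD (j + 1) 0) :
    (sumAdjInner ns i = .inl ns ∧ List.IsChain (· ≠ ·) ns) ∨
    (∃ r, sumAdjInner ns i = .inr r ∧ sum_adj_nums_alt r = sum_adj_nums_alt ns ∧
      r.length + 1 = ns.length) :=
  sumAdjInnerGo_spec (ns.length - i) ns i hi (by omega) hinv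

-- A's outer loop computes B's result, given fuel ≥ length (one merge per pass).
theorem sumAdjWhile_eq_alt (fuel : Nat) : ∀ ns : List Int, ns ≠ [] → ns.length ≤ fuel →
    sumAdjWhile fuel ns = sum_adj_nums_alt ns := by
  induction fuel with
  | zero =>
      intro ns hne hlen
      exact absurd (List.length_eq_zero_iff.mp (Nat.le_zero.mp hlen)) hne
  | succ fuel ih =>
      intro ns hne hlen
      rcases Nat.lt_or_ge ns.length 2 with h2 | h2
      · -- length = 1: the inner range is empty, the pass returns ns
        have hlen1 : ns.length = 1 := by
          have := List.length_pos_iff.mpr hne; omega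
        obtain ⟨x, rfl⟩ := List.length_eq_one_iff.mp hlen1
        have hin : sumAdjInner [x] 0 = .inr [x] := by
          rw [sumAdjInner]; simp [sumAdjInnerGo]
        simp [sumAdjWhile, hin, alt_singleton]
      · rcases sumAdjInner_spec ns 0 h2 (by intro j hj; omega) with
          ⟨hin, hc⟩ | ⟨r, hin, halt, hlenr⟩
        · simp [sumAdjWhile, hin, alt_chain ns hc]
        · have hrne : r ≠ [] := by
            intro h; rw [h] at hlenr; simp at hlenr; omega
          by_cases hr1 : r.length = 1
          · obtain ⟨x, rfl⟩ := List.length_eq_one_iff.mp hr1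
            simp [sumAdjWhile, hin, ← halt, alt_singleton]
          · have : sumAdjWhile fuel r = sum_adj_nums_alt r :=
              ih r hrne (by omega)
            simp [sumAdjWhile, hin, hr1, this, halt]

-- ===== VERDICT (by name: the statement is the Claim_ definition above) =====
theorem sum_adj_nums_spec : Claim_equal_sum_adj_nums := by
  intro numbers _ hpre
  unfold Spec_sum_adj_nums sum_adj_nums
  exact sumAdjWhile_eq_alt numbers.length numbers hpre (le_refl _)
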